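-- pv_equiv track=rewrite | github.com/mariaRamahalison/Projet-Simulation-et-adressage | adressage ETU001028/Ipv6.py | replaceNone
-- ===== SOURCE A (Python) =====
-- def replaceNone(hexa):
--     hexas=list(hexa)
--     nb=0
--     for i in range(len(hexas)-1):
--         if hexas[i]=="0" and nb==0:
--             hexas[i]=""
--         else:
--             nb=1
--     return "".join(hexas)
-- ===== SOURCE B (Python) =====
-- def replaceNone(hexa):
--     return hexa[:-1].lstrip("0") + hexa[-1:]
-- ===== Notes on version B (the rewrite author's own statement) =====
-- stated objective: idiomatic
-- what changed: Replaces the flag-driven index loop that blanks leading-zero cells of a char list and re-joins with a closed-form slice expression: strip leading zeros from everything before the last character with the C-implemented str.lstrip and concatenate the last character back.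
import Mathlib
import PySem

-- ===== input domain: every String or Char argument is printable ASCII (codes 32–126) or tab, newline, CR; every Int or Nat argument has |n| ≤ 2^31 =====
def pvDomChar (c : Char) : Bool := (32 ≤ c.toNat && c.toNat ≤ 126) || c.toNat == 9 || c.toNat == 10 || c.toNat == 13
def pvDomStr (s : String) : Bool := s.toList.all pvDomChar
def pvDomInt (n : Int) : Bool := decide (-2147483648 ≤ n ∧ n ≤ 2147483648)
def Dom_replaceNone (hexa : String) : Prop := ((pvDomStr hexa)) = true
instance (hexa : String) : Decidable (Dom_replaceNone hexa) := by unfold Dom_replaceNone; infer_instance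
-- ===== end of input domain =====

-- B strips the leading zeros of everything before the last character with a closed-form
-- slice expression instead of A's flag-driven index loop over a mutable char list (idiomatic).

-- ===== PORT A =====
-- the loop body of A's 'for i in range(len(hexas)-1)' (hexas[i] read via pyGetD: i is always in range)
def replaceNoneStep (st : List String × Int) (i : Int) : List String × Int :=
  if PySem.List.pyGetD st.1 i "" = "0" ∧ st.2 = 0 then
    (st.1.set i.toNat "", st.2)
  else
    (st.1, 1)

def replaceNone (hexa : String) : String :=
  let hexas : List String := hexa.toList.map (fun c => String.ofList [c])
  let r := (PySem.List.pyRange 0 ((hexas.length : Int) - 1) 1).foldl replaceNoneStep (hexas, 0)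
  PySem.Str.join "" r.1

-- ===== PORT B =====
-- hexa[:-1].lstrip("0") + hexa[-1:] ; lstrip("0") ported by hand as dropWhile (== '0')
-- (exact: removes exactly the leading '0' characters), slices via PySem.Str.slice
def replaceNone_alt (hexa : String) : String :=
  String.ofList (((PySem.Str.slice hexa none (some (-1))).toList.dropWhile (· == '0'))
    ++ (PySem.Str.slice hexa (some (-1)) none).toList)

-- ===== PRECONDITION & SPEC =====
def Spec_replaceNone (hexa : String) (out : String) : Prop := out = replaceNone_alt hexa
instance (hexa : String) (out : String) : Decidable (Spec_replaceNone hexa out) := by unfold Spec_replaceNone; infer_instance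

-- ===== CLAIM (what is proved, stated in full; the proofs are below) =====
def Claim_equal_replaceNone : Prop := ∀ (hexa : String), Dom_replaceNone hexa → Spec_replaceNone hexa (replaceNone hexa)

-- ===== LEMMAS AND PROOFS =====

-- once nb = 1, the loop never changes the state again
theorem replaceNoneStep_nb1 (r : List Int) (hs : List String) :
    r.foldl replaceNoneStep (hs, 1) = (hs, 1) := by
  induction r with
  | nil => rfl
  | cons i r ih => simpa [replaceNoneStep] using ih

-- functional characterisation of A's loop effect on the suffix not yet processed
def procZ : List String → List String
  | [] => []
  | [x] => [x]
  | x :: y :: rest => if x = "0" then "" :: procZ (y :: rest) else x :: y :: rest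

def nbZ : List String → Int
  | [] => 0
  | [_] => 0
  | x :: y :: rest => if x = "0" then nbZ (y :: rest) else 1

theorem replaceNone_loop (suf : List String) : ∀ (pre : List String) (b : Int),
    b = (pre.length : Int) + (suf.length : Int) - 1 →
    (PySem.List.pyRange (pre.length : Int) b 1).foldl replaceNoneStep (pre ++ suf, 0)
      = (pre ++ procZ suf, nbZ suf) := by
  induction suf with
  | nil =>
    intro pre b hb
    rw [PySem.List.pyRange_one_eq_nil (by subst hb; simp)]
    simp [procZ, nbZ]
  | cons x t ih =>
    intro pre b hb
    cases t with
    | nil =>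
      rw [PySem.List.pyRange_one_eq_nil (by subst hb; simp)]
      simp [procZ, nbZ]
    | cons y rest =>
      rw [PySem.List.pyRange_one_cons (by subst hb; simp; omega)]
      simp only [List.foldl_cons]
      by_cases hx : x = "0"
      · have hstep : replaceNoneStep (pre ++ x :: y :: rest, 0) (pre.length : Int)
            = (pre ++ "" :: y :: rest, 0) := by
          simp [replaceNoneStep, hx]
        rw [hstep]
        rw [show (pre.length : Int) + 1 = (((pre ++ [""]).length : Nat) : Int) by simp]
        rw [show pre ++ "" :: y :: rest = (pre ++ [""]) ++ y :: rest by simp]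
        rw [ih (pre ++ [""]) b (by subst hb; simp; ring)]
        simp [procZ, nbZ, hx]
      · have hstep : replaceNoneStep (pre ++ x :: y :: rest, 0) (pre.length : Int)
            = (pre ++ x :: y :: rest, 1) := by
          simp [replaceNoneStep, hx]
        rw [hstep, replaceNoneStep_nb1]
        simp [procZ, nbZ, hx]

theorem join_nil_cons (p : List Char) (parts : List (List Char)) :
    PySem.Chars.join [] (p :: parts) = p ++ PySem.Chars.join [] parts := by
  cases parts with
  | nil => simp [PySem.Chars.join_singleton, PySem.Chars.join_nil]
  | cons q r => simp [PySem.Chars.join_cons_cons]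

theorem dropLast_append_drop {α : Type} (l : List α) :
    l.dropLast ++ l.drop (l.length - 1) = l := by
  induction l with
  | nil => rfl
  | cons a t ih =>
    cases t with
    | nil => rfl
    | cons b u => simpa using ih

-- joining the processed singleton list gives B's closed form
theorem join_procZ (cs : List Char) :
    PySem.Chars.join [] ((procZ (cs.map (fun c => String.ofList [c]))).map String.toList)
      = cs.dropLast.dropWhile (· == '0') ++ cs.drop (cs.length - 1) := by
  induction cs with
  | nil => simp [procZ, PySem.Chars.join_nil]
  | cons c t ih =>
    cases t with
    | nil => simp [procZ, PySem.Chars.join_singleton]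
    | cons d rest =>
      by_cases hc : c = '0'
      · subst hc
        simp only [List.map_cons, procZ]
        rw [if_pos (by decide)]
        simp only [List.map_cons, join_nil_cons]
        simp only [List.map_cons] at ih
        simpa [List.dropWhile] using ih
      · simp only [List.map_cons, procZ]
        rw [if_neg (by
          intro h
          apply hc
          have h2 := congrArg String.toList h
          simpa using h2)]
        rw [show (String.ofList [c] :: String.ofList [d]
              :: (rest.map (fun c => String.ofList [c])))
            = (c :: d :: rest).map (fun c => String.ofList [c]) by simp]
        rw [show ((c :: d :: rest).map (fun c => String.ofList [c])).map String.toList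
            = (c :: d :: rest).map (fun c => [c]) by simp]
        rw [PySem.Chars.join_nil_singletons]
        have h1 : (c :: d :: rest).dropLast = c :: (d :: rest).dropLast := by simp
        rw [h1, List.dropWhile_cons_of_neg (by simp [hc])]
        have h2 := dropLast_append_drop (c :: d :: rest)
        rw [h1] at h2
        exact h2.symm

theorem replaceNone_eq (hexa : String) : replaceNone hexa = replaceNone_alt hexa := by
  simp only [replaceNone, replaceNone_alt]
  have hloop := replaceNone_loop (hexa.toList.map (fun c => String.ofList [c])) []
      (((hexa.toList.map (fun c => String.ofList [c])).length : Int) - 1) (by simp)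
  simp only [List.length_nil, Nat.cast_zero, List.nil_append] at hloop
  rw [hloop]
  apply String.ext
  rw [PySem.Str.toList_join]
  rw [show ("" : String).toList = ([] : List Char) from rfl]
  rw [join_procZ]
  have hfrom : (PySem.Str.slice hexa (some (-1)) none).toList
      = hexa.toList.drop (hexa.toList.length - 1) := by
    simp [PySem.Str.slice, PySem.Chars.slice_eq_listSlice, PySem.List.slice_from_neg_one]
  simp [PySem.List.slice_to_neg_one, hfrom]

-- ===== VERDICT (by name: the statement is the Claim_ definition above) =====
theorem replaceNone_spec : Claim_equal_replaceNone := by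
  intro hexa _
  exact replaceNone_eq hexa
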